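-- pv_equiv track=rewrite | github.com/ShomRinn/PythonAlgorithms | floyd-warshall-task-python/tasks/all_pairs_shortest_paths.py | get_sum_of_all_pairs_shortest_paths
-- ===== SOURCE A (Python) =====
-- from typing import List, Tuple
--
-- def get_sum_of_all_pairs_shortest_paths(n: int, adj_matrix: List[List[int]]) -> Tuple[int, int]:
--     """
--     Returns a tuple in which the first value is the sum of the all-pairs shortest paths between all connected vertices
--     and the second is the number of disconnected pairs of vertices in an undirected weighted graph.
--     The weight of (u,v)-edge represents the distance between 'u' and 'v' and vice versa.
--
--     Edges are stored as an adjacency matrix, where 0 means no edge and a positive value indicates the presence of an edge and reflects its weight.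
--     The expected algorithm complexity is O(N^3), where N is the number of vertices.
--     The vertices are enumerated from 0 to N-1, where N is the number of vertices.
--
--     For example, you have a graph with three vertices from 0 to 2 and the following adjacency matrix:
--     [[0, 10, 5], [10, 0, 6], [5, 6, 0]]
--     The expected result is (42, 0).
--
--     Parameters:
--         n (int) : number of vertices in the graph, vertices are enumerated from 0 to n-1
--         adj_matrix (List[List[int]]): adjacency matrix with weights
--     Returns:
--         Tuple [int, int]: the sum of the all-pairs shortest paths between all connected vertices
--         and the number of disconnected pairs of vertices
--     """
--     shortest_paths = [[float('inf') if adj_matrix[i][j] == 0 and i != j else adj_matrix[i][j] for j in range(n)] for i in range(n)]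
--
--     for k in range(n):
--         for i in range(n):
--             for j in range(n):
--                 shortest_paths[i][j] = min(shortest_paths[i][j], shortest_paths[i][k] + shortest_paths[k][j])
--
--     sum_of_paths = 0
--     disconnected_pairs = 0
--
--     for i in range(n):
--         for j in range(n):
--             if i != j:
--                 if shortest_paths[i][j] == float('inf'):
--                     disconnected_pairs += 1
--                 else:
--                     sum_of_paths += shortest_paths[i][j]
--
--     return sum_of_paths, disconnected_pairs
-- ===== SOURCE B (Python) =====
-- from typing import List, Tuple
--
-- def get_sum_of_all_pairs_shortest_paths(n: int, adj_matrix: List[List[int]]) -> Tuple[int, int]: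
--     """Per-source Bellman-Ford (Jacobi relaxation rounds) instead of Floyd-Warshall."""
--     INF = float('inf')
--     total = 0
--     disconnected = 0
--     for s in range(n):
--         dist = [0 if v == s else INF for v in range(n)]
--         for _ in range(n):
--             dist = [min([dist[v]] + [dist[u] + adj_matrix[u][v]
--                                      for u in range(n) if u != v and adj_matrix[u][v] > 0])
--                     for v in range(n)]
--         for v in range(n):
--             if v != s:
--                 d = dist[v]
--                 if d == INF:
--                     disconnected += 1
--                 else:
--                     total += d
--     return total, disconnected
-- ===== Notes on version B (the rewrite author's own statement) =====
-- stated objective: alternative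
-- what changed: Replaces the global Floyd-Warshall triple loop over the distance matrix by per-source Bellman-Ford: for each source s a distance vector is initialised and relaxed for n rounds over the edges (adj_matrix[u][v] > 0, u != v), then finite distances are summed and infinite ones counted.
-- outside the precondition, e.g. on get_sum_of_all_pairs_shortest_paths(2, [[0, -1], [-1, 0]]): A returns (-6, 0), B returns (0, 2); on get_sum_of_all_pairs_shortest_paths(2, [[0, -3], [2, 0]]): A returns (-3, 0), B returns (2, 1)
import Mathlib
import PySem

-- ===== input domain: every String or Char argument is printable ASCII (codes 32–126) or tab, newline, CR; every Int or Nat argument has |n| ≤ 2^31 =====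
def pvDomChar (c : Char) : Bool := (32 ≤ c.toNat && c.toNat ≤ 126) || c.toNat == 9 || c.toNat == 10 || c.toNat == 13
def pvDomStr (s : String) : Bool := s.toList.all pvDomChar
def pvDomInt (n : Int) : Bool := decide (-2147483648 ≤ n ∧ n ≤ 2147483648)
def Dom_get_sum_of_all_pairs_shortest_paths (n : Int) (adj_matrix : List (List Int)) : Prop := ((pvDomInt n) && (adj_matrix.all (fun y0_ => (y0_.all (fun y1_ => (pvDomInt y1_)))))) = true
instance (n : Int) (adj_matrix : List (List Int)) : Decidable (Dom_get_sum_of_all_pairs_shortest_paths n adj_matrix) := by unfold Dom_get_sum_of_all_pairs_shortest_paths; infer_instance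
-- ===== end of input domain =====

-- B replaces A's Floyd-Warshall triple loop by per-source Bellman-Ford relaxation rounds
-- (alternative algorithm, same return value on the stated domain; no speed claim).

-- ===== PORT A =====
-- Python's float('inf') is modelled by 'none : Option Int'; 'min' and '+' on
-- {ints, inf} are pvOmin / pvOadd (exact: inf is absorbing for +, greatest for min).
def pvOmin (x y : Option Int) : Option Int :=
  match x, y with
  | some a, some b => some (min a b)
  | some a, none => some a
  | none, b => b

def pvOadd (x y : Option Int) : Option Int :=
  match x, y with
  | some a, some b => some (a + b)
  | _, _ => none

-- adj_matrix[i][j]; in range under Pre_, so the getD defaults are never hit there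
def pvEntry (adj_matrix : List (List Int)) (i j : Nat) : Int := (adj_matrix.getD i []).getD j 0

-- shortest_paths[i][j] read / write (in range under Pre_)
def pvMget (M : List (List (Option Int))) (i j : Nat) : Option Int := (M.getD i []).getD j none

def pvMset (M : List (List (Option Int))) (i j : Nat) (v : Option Int) : List (List (Option Int)) :=
  M.set i ((M.getD i []).set j v)

-- literal transliteration of A: build the matrix, Floyd-Warshall triple loop, then the summing double loop
def get_sum_of_all_pairs_shortest_paths (n : Int) (adj_matrix : List (List Int)) : Int × Int :=
  -- n.toNat: range(n) is empty for n ≤ 0; the three stages are A's three statements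
  (List.range n.toNat).foldl (fun p i =>
    (List.range n.toNat).foldl (fun p j =>
      if i ≠ j then
        match pvMget ((List.range n.toNat).foldl (fun M k =>
            (List.range n.toNat).foldl (fun M i =>
              (List.range n.toNat).foldl (fun M j =>
                pvMset M i j (pvOmin (pvMget M i j) (pvOadd (pvMget M i k) (pvMget M k j)))) M) M)
          ((List.range n.toNat).map (fun i => (List.range n.toNat).map (fun j =>
            if pvEntry adj_matrix i j = 0 ∧ i ≠ j then none else some (pvEntry adj_matrix i j))))) i j with
        | none => (p.1, p.2 + 1)
        | some v => (p.1 + v, p.2)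
      else p) p) ((0 : Int), (0 : Int))

-- ===== PORT B =====
-- dist[v] read (in range under Pre_)
def pvDget (d : List (Option Int)) (v : Nat) : Option Int := d.getD v none

-- literal transliteration of B: for each source s, n Jacobi rounds of Bellman-Ford
-- relaxation (min over [dist[v]] ++ [dist[u] + w(u,v) for edges u→v]), then summing
def get_sum_of_all_pairs_shortest_paths_alt (n : Int) (adj_matrix : List (List Int)) : Int × Int :=
  (List.range n.toNat).foldl (fun p s =>
    (List.range n.toNat).foldl (fun p v =>
      if v = s then p
      else
        match pvDget ((List.range n.toNat).foldl (fun d _ =>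
            (List.range n.toNat).map (fun v =>
              ((((List.range n.toNat).filter (fun u => decide (u ≠ v ∧ 0 < pvEntry adj_matrix u v))).map
                  (fun u => pvOadd (pvDget d u) (some (pvEntry adj_matrix u v)))).foldl
                pvOmin (pvDget d v))))
          ((List.range n.toNat).map (fun v => if v = s then some 0 else none))) v with
        | none => (p.1, p.2 + 1)
        | some x => (p.1 + x, p.2)) p) ((0 : Int), (0 : Int))

-- ===== PRECONDITION & SPEC =====
-- Pre_ excludes (a) shapes on which A raises IndexError (fewer than n rows, or a row
-- with fewer than n entries), and (b) matrices with a negative entry in the n×n block: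
-- a negative entry is outside the function's stated domain ('0 means no edge and a
-- positive value indicates the presence of an edge'), where A runs Floyd-Warshall over
-- negative edge weights (and negative cycles) while B's Bellman-Ford does not.
def Pre_get_sum_of_all_pairs_shortest_paths (n : Int) (adj_matrix : List (List Int)) : Prop :=
  n.toNat ≤ adj_matrix.length ∧
  ∀ i < n.toNat, n.toNat ≤ (adj_matrix.getD i []).length ∧ ∀ j < n.toNat, 0 ≤ pvEntry adj_matrix i j

instance (n : Int) (adj_matrix : List (List Int)) : Decidable (Pre_get_sum_of_all_pairs_shortest_paths n adj_matrix) := by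
  unfold Pre_get_sum_of_all_pairs_shortest_paths; infer_instance

def pvWitness_get_sum_of_all_pairs_shortest_paths : Int × List (List Int) :=
  (3, [[0, 10, 5], [10, 0, 6], [5, 6, 0]])

def Spec_get_sum_of_all_pairs_shortest_paths (n : Int) (adj_matrix : List (List Int)) (out : Int × Int) : Prop := out = get_sum_of_all_pairs_shortest_paths_alt n adj_matrix
instance (n : Int) (adj_matrix : List (List Int)) (out : Int × Int) : Decidable (Spec_get_sum_of_all_pairs_shortest_paths n adj_matrix out) := by unfold Spec_get_sum_of_all_pairs_shortest_paths; infer_instance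

-- ===== CLAIM (what is proved, stated in full; the proofs are below) =====
def Claim_equal_get_sum_of_all_pairs_shortest_paths : Prop := ∀ (n : Int) (adj_matrix : List (List Int)), Dom_get_sum_of_all_pairs_shortest_paths n adj_matrix → Pre_get_sum_of_all_pairs_shortest_paths n adj_matrix → Spec_get_sum_of_all_pairs_shortest_paths n adj_matrix (get_sum_of_all_pairs_shortest_paths n adj_matrix)

-- ===== LEMMAS AND PROOFS =====

-- the order on Option Int with none = +infinity
def pvLe (x y : Option Int) : Prop :=
  match x, y with
  | _, none => True
  | none, some _ => False
  | some a, some b => a ≤ b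

-- x is nonnegative (none counts: infinity ≥ 0)
def pvNneg (x : Option Int) : Prop := pvLe (some 0) x

-- edge weights: w u v is the weight of the edge u→v of the graph both programs search
def pvW (N : Nat) (a : Nat → Nat → Int) (u v : Nat) : Option Int :=
  if u < N ∧ v < N ∧ u ≠ v ∧ 0 < a u v then some (a u v) else none

-- A's initial matrix, as a function
def pvM0 (N : Nat) (a : Nat → Nat → Int) (i j : Nat) : Option Int :=
  if i < N ∧ j < N then (if a i j = 0 ∧ i ≠ j then none else some (a i j)) else none

-- functional Floyd-Warshall layers
def pvF (N : Nat) (a : Nat → Nat → Int) : Nat → Nat → Nat → Option Int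
  | 0, i, j => pvM0 N a i j
  | k + 1, i, j => pvOmin (pvF N a k i j) (pvOadd (pvF N a k i k) (pvF N a k k j))

-- min over u < N of f u, seeded with init
def pvVmin (N : Nat) (f : Nat → Option Int) (init : Option Int) : Option Int :=
  (List.range N).foldl (fun acc u => pvOmin acc (f u)) init

-- Bellman-Ford layers: pvBW N a L i j = min cost of a walk i→j with at most L edges
def pvBW (N : Nat) (a : Nat → Nat → Int) : Nat → Nat → Nat → Option Int
  | 0, i, j => if i = j then some 0 else none
  | L + 1, i, j => pvVmin N (fun u => pvOadd (pvBW N a L i u) (pvW N a u j)) (pvBW N a L i j)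

-- cost of the walk i → … → j whose edge sources, from the last edge backwards, are vs
-- (vs = [] is the empty walk, only valid for i = j; a single edge i→j is vs = [i])
def pvRcost (N : Nat) (a : Nat → Nat → Int) (i : Nat) : List Nat → Nat → Option Int
  | [], j => if i = j then some 0 else none
  | u :: us, j => pvOadd (pvRcost N a i us u) (pvW N a u j)

-- canonical matrix / vector renderings of functions
def pvCanon (N : Nat) (f : Nat → Nat → Option Int) : List (List (Option Int)) :=
  (List.range N).map (fun i => (List.range N).map (f i))

def pvVec (N : Nat) (h : Nat → Option Int) : List (Option Int) :=
  (List.range N).map h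

theorem pvLe_refl (x : Option Int) : pvLe x x := by cases x <;> simp [pvLe]

theorem pvLe_none (x : Option Int) : pvLe x none := by cases x <;> simp [pvLe]

theorem pvLe_none_left {x : Option Int} (h : pvLe none x) : x = none := by
  cases x <;> simp [pvLe] at h ⊢

theorem pvLe_trans {x y z : Option Int} (h1 : pvLe x y) (h2 : pvLe y z) : pvLe x z := by
  cases x <;> cases y <;> cases z <;> simp_all [pvLe] <;> omega

theorem pvLe_antisymm {x y : Option Int} (h1 : pvLe x y) (h2 : pvLe y x) : x = y := by
  cases x <;> cases y <;> simp_all [pvLe] <;> omega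

theorem pvOmin_le_left (x y : Option Int) : pvLe (pvOmin x y) x := by
  cases x <;> cases y <;> simp [pvLe, pvOmin]

theorem pvOmin_le_right (x y : Option Int) : pvLe (pvOmin x y) y := by
  cases x <;> cases y <;> simp [pvLe, pvOmin]

theorem pvLe_omin {c x y : Option Int} (h1 : pvLe c x) (h2 : pvLe c y) : pvLe c (pvOmin x y) := by
  cases c <;> cases x <;> cases y <;> simp_all [pvLe, pvOmin] <;> omega

theorem pvOmin_eq_left {x y : Option Int} (h : pvLe x y) : pvOmin x y = x := by
  cases x <;> cases y <;> simp_all [pvLe, pvOmin] <;> omega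

theorem pvOmin_cases (x y : Option Int) : pvOmin x y = x ∨ pvOmin x y = y := by
  cases x <;> cases y <;> simp [pvOmin]
  rename_i a b
  rcases le_total a b with h | h
  · left; omega
  · right; omega

theorem pvOmin_none_right (x : Option Int) : pvOmin x none = x := by cases x <;> simp [pvOmin]

theorem pvOadd_none_right (x : Option Int) : pvOadd x none = none := by cases x <;> simp [pvOadd]

theorem pvOadd_none_left (x : Option Int) : pvOadd none x = none := by cases x <;> simp [pvOadd]

theorem pvOadd_zero_left (x : Option Int) : pvOadd (some 0) x = x := by
  cases x <;> simp [pvOadd]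

theorem pvOadd_assoc (x y z : Option Int) : pvOadd (pvOadd x y) z = pvOadd x (pvOadd y z) := by
  cases x <;> cases y <;> cases z <;> simp [pvOadd] <;> ring

theorem pvOadd_mono {x x' y y' : Option Int} (h1 : pvLe x x') (h2 : pvLe y y') :
    pvLe (pvOadd x y) (pvOadd x' y') := by
  cases x <;> cases x' <;> cases y <;> cases y' <;> simp_all [pvLe, pvOadd] <;> omega

theorem pvLe_oadd_right {x y : Option Int} (h : pvNneg y) : pvLe x (pvOadd x y) := by
  cases x <;> cases y <;> simp_all [pvLe, pvNneg, pvOadd] <;> omega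

theorem pvLe_oadd_left {x y : Option Int} (h : pvNneg y) : pvLe x (pvOadd y x) := by
  cases x <;> cases y <;> simp_all [pvLe, pvNneg, pvOadd] <;> omega

theorem pvNneg_omin {x y : Option Int} (hx : pvNneg x) (hy : pvNneg y) : pvNneg (pvOmin x y) :=
  pvLe_omin hx hy

theorem pvNneg_oadd {x y : Option Int} (hx : pvNneg x) (hy : pvNneg y) : pvNneg (pvOadd x y) := by
  cases x <;> cases y <;> simp_all [pvLe, pvNneg, pvOadd] <;> omega

theorem pvNneg_none : pvNneg (none : Option Int) := by simp [pvNneg, pvLe]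

theorem pvNneg_w (N : Nat) (a : Nat → Nat → Int) (u v : Nat) : pvNneg (pvW N a u v) := by
  unfold pvW; split
  · rename_i h; simp [pvNneg, pvLe]; omega
  · exact pvNneg_none


-- fold-min lemmas (the Python 'min' over a candidate list)
theorem pvFoldMin_le_init (f : Nat → Option Int) (l : List Nat) (init : Option Int) :
    pvLe (l.foldl (fun acc u => pvOmin acc (f u)) init) init := by
  induction l generalizing init with
  | nil => exact pvLe_refl _
  | cons u us ih => exact pvLe_trans (ih (pvOmin init (f u))) (pvOmin_le_left _ _)

theorem pvFoldMin_le_mem (f : Nat → Option Int) {l : List Nat} {u : Nat} (hu : u ∈ l)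
    (init : Option Int) : pvLe (l.foldl (fun acc u => pvOmin acc (f u)) init) (f u) := by
  induction l generalizing init with
  | nil => cases hu
  | cons v vs ih =>
    rcases List.mem_cons.mp hu with h | h
    · subst h
      exact pvLe_trans (pvFoldMin_le_init f vs _) (pvOmin_le_right _ _)
    · exact ih h _

theorem pvFoldMin_achieves (f : Nat → Option Int) (l : List Nat) (init : Option Int) :
    l.foldl (fun acc u => pvOmin acc (f u)) init = init ∨
      ∃ u ∈ l, l.foldl (fun acc u => pvOmin acc (f u)) init = f u := by
  induction l generalizing init with
  | nil => exact Or.inl rfl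
  | cons u us ih =>
    rcases ih (pvOmin init (f u)) with h | ⟨v, hv, h⟩
    · rw [List.foldl_cons, h]
      rcases pvOmin_cases init (f u) with h' | h'
      · exact Or.inl h'
      · exact Or.inr ⟨u, List.mem_cons_self, h'⟩
    · exact Or.inr ⟨v, List.mem_cons_of_mem _ hv, by rw [List.foldl_cons]; exact h⟩

theorem pvVmin_le_init (N : Nat) (f : Nat → Option Int) (init : Option Int) :
    pvLe (pvVmin N f init) init := pvFoldMin_le_init f _ init

theorem pvVmin_le (N : Nat) (f : Nat → Option Int) (init : Option Int) {u : Nat} (hu : u < N) :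
    pvLe (pvVmin N f init) (f u) := pvFoldMin_le_mem f (List.mem_range.mpr hu) init

theorem pvVmin_achieves (N : Nat) (f : Nat → Option Int) (init : Option Int) :
    pvVmin N f init = init ∨ ∃ u < N, pvVmin N f init = f u := by
  rcases pvFoldMin_achieves f (List.range N) init with h | ⟨u, hu, h⟩
  · exact Or.inl h
  · exact Or.inr ⟨u, List.mem_range.mp hu, h⟩


-- Floyd-Warshall layer facts (entries stay nonnegative; row/column k is fixed at round k)
theorem pvF_nonneg (N : Nat) (a : Nat → Nat → Int) (hnn : ∀ i j, i < N → j < N → 0 ≤ a i j) :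
    ∀ k i j, pvNneg (pvF N a k i j) := by
  intro k
  induction k with
  | zero =>
    intro i j
    unfold pvF pvM0
    split
    · rename_i h
      split
      · exact pvNneg_none
      · simp [pvNneg, pvLe]; exact hnn i j h.1 h.2
    · exact pvNneg_none
  | succ k ih =>
    intro i j
    exact pvNneg_omin (ih i j) (pvNneg_oadd (ih i k) (ih k j))

theorem pvF_col (N : Nat) (a : Nat → Nat → Int) (hnn : ∀ i j, i < N → j < N → 0 ≤ a i j)
    (k i : Nat) : pvF N a (k + 1) i k = pvF N a k i k := by
  show pvOmin _ _ = _
  exact pvOmin_eq_left (pvLe_oadd_right (pvF_nonneg N a hnn k k k))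

theorem pvF_row (N : Nat) (a : Nat → Nat → Int) (hnn : ∀ i j, i < N → j < N → 0 ≤ a i j)
    (k j : Nat) : pvF N a (k + 1) k j = pvF N a k k j := by
  show pvOmin _ _ = _
  exact pvOmin_eq_left (pvLe_oadd_left (pvF_nonneg N a hnn k k k))

-- walk-cost facts
theorem pvRcost_nonneg (N : Nat) (a : Nat → Nat → Int) (i : Nat) :
    ∀ vs j, pvNneg (pvRcost N a i vs j) := by
  intro vs
  induction vs with
  | nil =>
    intro j; unfold pvRcost; split
    · simp [pvNneg, pvLe]
    · exact pvNneg_none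
  | cons u us ih =>
    intro j
    exact pvNneg_oadd (ih u) (pvNneg_w N a u j)

-- splitting a walk at an occurrence of k
theorem pvRcost_split (N : Nat) (a : Nat → Nat → Int) (i k : Nat) :
    ∀ (p : List Nat) (rest : List Nat) (j : Nat),
      pvRcost N a i (p ++ k :: rest) j = pvOadd (pvRcost N a i rest k) (pvRcost N a k (p ++ [k]) j) := by
  intro p
  induction p with
  | nil =>
    intro rest j
    show pvOadd (pvRcost N a i rest k) (pvW N a k j) = _
    show _ = pvOadd (pvRcost N a i rest k) (pvOadd (if k = k then some 0 else none) (pvW N a k j))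
    simp [pvOadd_zero_left]
  | cons x p' ih =>
    intro rest j
    show pvOadd (pvRcost N a i (p' ++ k :: rest) x) (pvW N a x j) = _
    rw [ih rest x]
    have : pvRcost N a k ((x :: p') ++ [k]) j = pvOadd (pvRcost N a k (p' ++ [k]) x) (pvW N a x j) := rfl
    rw [this, ← pvOadd_assoc]

-- removing a cycle from a walk does not increase its cost
theorem pvRcost_drop_cycle (N : Nat) (a : Nat → Nat → Int) (i u : Nat)
    (l1 l2 l3 : List Nat) (j : Nat) :
    pvLe (pvRcost N a i (l1 ++ u :: l3) j) (pvRcost N a i (l1 ++ u :: l2 ++ u :: l3) j) := by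
  rw [pvRcost_split N a i u l1 l3 j]
  have h2 : l1 ++ u :: l2 ++ u :: l3 = l1 ++ u :: (l2 ++ u :: l3) := by simp
  rw [h2, pvRcost_split N a i u l1 (l2 ++ u :: l3) j]
  refine pvOadd_mono ?_ (pvLe_refl _)
  rw [pvRcost_split N a i u l2 l3 u]
  exact pvLe_oadd_right (pvRcost_nonneg N a u (l2 ++ [u]) u)

-- a walk through a vertex ≥ N costs infinity
theorem pvRcost_top (N : Nat) (a : Nat → Nat → Int) (i : Nat) :
    ∀ (vs : List Nat) (j : Nat), (∃ x ∈ vs, ¬ x < N) → pvRcost N a i vs j = none := by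
  intro vs
  induction vs with
  | nil => intro j h; rcases h with ⟨x, hx, _⟩; cases hx
  | cons u us ih =>
    intro j ⟨x, hx, hxN⟩
    rcases List.mem_cons.mp hx with h | h
    · subst h
      show pvOadd _ (pvW N a x j) = none
      have : pvW N a x j = none := by unfold pvW; rw [if_neg]; intro hc; exact hxN hc.1
      rw [this, pvOadd_none_right]
    · show pvOadd (pvRcost N a i us u) _ = none
      rw [ih u ⟨x, h, hxN⟩, pvOadd_none_left]

-- a finite-cost nonempty walk's edge-source list ends at the start vertex i
theorem pvRcost_last (N : Nat) (a : Nat → Nat → Int) (i : Nat) :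
    ∀ (vs : List Nat) (j : Nat), pvRcost N a i vs j ≠ none → vs = [] ∨ vs.getLast? = some i := by
  intro vs
  induction vs with
  | nil => intro j _; exact Or.inl rfl
  | cons u us ih =>
    intro j h
    right
    have hsub : pvRcost N a i us u ≠ none := by
      intro hc
      apply h
      show pvOadd _ _ = none
      rw [hc, pvOadd_none_left]
    rcases ih u hsub with h' | h'
    · subst h'
      have : i = u := by
        by_contra hne
        apply hsub
        show (if i = u then some (0 : Int) else none) = none
        rw [if_neg hne]
      subst this
      rfl
    · rw [List.getLast?_cons, h']
      cases us
      · cases h'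
      · rfl


-- Bellman-Ford layer facts
theorem pvBW_antitone_succ (N : Nat) (a : Nat → Nat → Int) (L i j : Nat) :
    pvLe (pvBW N a (L + 1) i j) (pvBW N a L i j) := pvVmin_le_init N _ _

theorem pvBW_le_diag (N : Nat) (a : Nat → Nat → Int) (L i : Nat) :
    pvLe (pvBW N a L i i) (some 0) := by
  induction L with
  | zero => show pvLe (if i = i then some (0:Int) else none) _; rw [if_pos rfl]; exact pvLe_refl _
  | succ L ih => exact pvLe_trans (pvBW_antitone_succ N a L i i) ih

-- the L-layer is a lower bound on the cost of every walk with at most L edges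
theorem pvBW_complete (N : Nat) (a : Nat → Nat → Int) (i : Nat) :
    ∀ (L : Nat) (vs : List Nat) (j : Nat), vs.length ≤ L →
      pvLe (pvBW N a L i j) (pvRcost N a i vs j) := by
  intro L
  induction L with
  | zero =>
    intro vs j h
    have : vs = [] := List.length_eq_zero_iff.mp (Nat.le_zero.mp h)
    subst this
    exact pvLe_refl _
  | succ L ih =>
    intro vs j h
    cases vs with
    | nil =>
      show pvLe _ (if i = j then some (0:Int) else none)
      by_cases hij : i = j
      · subst hij
        rw [if_pos rfl]
        exact pvLe_trans (pvBW_antitone_succ N a L i i) (pvBW_le_diag N a L i)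
      · rw [if_neg hij]; exact pvLe_none _
    | cons u us =>
      by_cases hu : u < N
      · show pvLe _ (pvOadd (pvRcost N a i us u) (pvW N a u j))
        refine pvLe_trans (pvVmin_le N _ _ hu) ?_
        exact pvOadd_mono (ih us u (by simpa using Nat.succ_le_succ_iff.mp (by simpa using h))) (pvLe_refl _)
      · rw [pvRcost_top N a i (u :: us) j ⟨u, List.mem_cons_self, hu⟩]
        exact pvLe_none _

-- every finite layer value is witnessed by an actual walk
theorem pvBW_sound (N : Nat) (a : Nat → Nat → Int) :
    ∀ (L i j : Nat), pvBW N a L i j = none ∨ ∃ vs, pvLe (pvRcost N a i vs j) (pvBW N a L i j) := by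
  intro L
  induction L with
  | zero =>
    intro i j
    by_cases hij : i = j
    · subst hij
      right
      exact ⟨[], by show pvLe (if i = i then _ else _) (if i = i then _ else _); rw [if_pos rfl]; exact pvLe_refl _⟩
    · left; show (if i = j then some (0:Int) else none) = none; rw [if_neg hij]
  | succ L ih =>
    intro i j
    rcases pvVmin_achieves N (fun u => pvOadd (pvBW N a L i u) (pvW N a u j)) (pvBW N a L i j) with h | ⟨u, hu, h⟩
    · show pvBW N a (L+1) i j = none ∨ _
      have hrw : pvBW N a (L + 1) i j = pvBW N a L i j := h
      rcases ih i j with h' | ⟨vs, hvs⟩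
      · left; rw [hrw, h']
      · right; exact ⟨vs, by rw [hrw]; exact hvs⟩
    · have hrw : pvBW N a (L + 1) i j = pvOadd (pvBW N a L i u) (pvW N a u j) := h
      rcases ih i u with h' | ⟨vs, hvs⟩
      · left; rw [hrw, h', pvOadd_none_left]
      · right
        refine ⟨u :: vs, ?_⟩
        rw [hrw]
        exact pvOadd_mono hvs (pvLe_refl _)

-- duplicate splitting helpers
theorem pv_mem_split_first {x : Nat} :
    ∀ {l : List Nat}, x ∈ l → ∃ p q, l = p ++ x :: q ∧ x ∉ p := by
  intro l
  induction l with
  | nil => intro h; cases h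
  | cons u us ih =>
    intro h
    by_cases hx : x = u
    · subst hx
      exact ⟨[], us, rfl, by simp⟩
    · rcases List.mem_cons.mp h with h' | h'
      · exact absurd h' hx
      · rcases ih h' with ⟨p, q, hpq, hnp⟩
        exact ⟨u :: p, q, by rw [hpq]; rfl, by simp [hnp, Ne.symm]; exact fun hc => hx hc⟩

theorem pv_not_nodup_split :
    ∀ {l : List Nat}, ¬ l.Nodup → ∃ l1 u l2 l3, l = l1 ++ u :: l2 ++ u :: l3 := by
  intro l
  induction l with
  | nil => intro h; exact absurd List.nodup_nil h
  | cons u us ih =>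
    intro h
    by_cases hu : u ∈ us
    · rcases List.append_of_mem hu with ⟨l2, l3, h23⟩
      exact ⟨[], u, l2, l3, by rw [h23]; rfl⟩
    · have : ¬ us.Nodup := by
        intro hn
        exact h (List.nodup_cons.mpr ⟨hu, hn⟩)
      rcases ih this with ⟨l1, v, l2, l3, h'⟩
      exact ⟨u :: l1, v, l2, l3, by rw [h']; rfl⟩

theorem pv_bounded_nodup_length {N : Nat} :
    ∀ {l : List Nat}, l.Nodup → (∀ x ∈ l, x < N) → l.length ≤ N := by
  intro l hn hb
  have h1 : l.toFinset.card = l.length := List.toFinset_card_of_nodup hn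
  have h2 : l.toFinset ⊆ Finset.range N := by
    intro x hx
    exact Finset.mem_range.mpr (hb x (List.mem_toFinset.mp hx))
  have := Finset.card_le_card h2
  rw [h1, Finset.card_range] at this
  exact this

-- stabilisation: the N-layer is a lower bound on the cost of EVERY walk
theorem pvBW_stab (N : Nat) (a : Nat → Nat → Int) (i : Nat) :
    ∀ (m : Nat) (vs : List Nat) (j : Nat), vs.length ≤ m →
      pvLe (pvBW N a N i j) (pvRcost N a i vs j) := by
  intro m
  induction m with
  | zero =>
    intro vs j h
    have : vs = [] := List.length_eq_zero_iff.mp (Nat.le_zero.mp h)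
    subst this
    exact pvBW_complete N a i N [] j (by simp)
  | succ m ih =>
    intro vs j hlen
    by_cases hbig : ∃ x ∈ vs, ¬ x < N
    · rw [pvRcost_top N a i vs j hbig]; exact pvLe_none _
    · push_neg at hbig
      by_cases hsh : vs.length ≤ N
      · exact pvBW_complete N a i N vs j hsh
      · have hnd : ¬ vs.Nodup := by
          intro hn
          exact hsh (pv_bounded_nodup_length hn hbig)
        rcases pv_not_nodup_split hnd with ⟨l1, u, l2, l3, hsplit⟩
        subst hsplit
        refine pvLe_trans (ih (l1 ++ u :: l3) j ?_) (pvRcost_drop_cycle N a i u l1 l2 l3 j)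
        have := hlen
        simp at this ⊢
        omega


-- Floyd-Warshall completeness: layer k is a lower bound on every walk whose
-- intermediate vertices (edge sources other than the final start vertex) are < k
theorem pvF_complete (N : Nat) (a : Nat → Nat → Int) (hnn : ∀ i j, i < N → j < N → 0 ≤ a i j) :
    ∀ (k m : Nat) (i : Nat) (ws : List Nat) (j : Nat), ws.length ≤ m → (∀ x ∈ ws, x < k) →
      pvLe (pvF N a k i j) (pvRcost N a i (ws ++ [i]) j) := by
  intro k
  induction k with
  | zero =>
    intro m i ws j _ hlt
    have hws : ws = [] := by
      cases ws with
      | nil => rfl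
      | cons x xs => exact absurd (hlt x List.mem_cons_self) (Nat.not_lt_zero x)
    subst hws
    have hr : pvRcost N a i ([] ++ [i]) j = pvW N a i j := by
      show pvOadd (if i = i then some (0:Int) else none) (pvW N a i j) = _
      rw [if_pos rfl, pvOadd_zero_left]
    rw [hr]
    show pvLe (pvM0 N a i j) (pvW N a i j)
    unfold pvM0 pvW
    split_ifs with h1 h2 h3 <;>
      first
        | exact pvLe_refl _
        | exact pvLe_none _
        | (exfalso; tauto)
        | (have := hnn i j; simp [pvLe]; omega)
  | succ k ihk =>
    intro m
    induction m with
    | zero =>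
      intro i ws j hlen hlt
      have hws : ws = [] := List.length_eq_zero_iff.mp (Nat.le_zero.mp hlen)
      subst hws
      exact pvLe_trans (pvOmin_le_left _ _) (ihk 0 i [] j (by simp) (by simp))
    | succ m ihm =>
      intro i ws j hlen hlt
      by_cases hk : k ∈ ws
      · rcases pv_mem_split_first hk with ⟨p, q, hpq, hknp⟩
        subst hpq
        have hsplit : (p ++ k :: q) ++ [i] = p ++ k :: (q ++ [i]) := by simp
        rw [hsplit, pvRcost_split N a i k p (q ++ [i]) j]
        have hb1 : pvLe (pvF N a (k + 1) i k) (pvRcost N a i (q ++ [i]) k) := by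
          refine ihm i q k ?_ ?_
          · have := hlen; simp at this ⊢; omega
          · intro x hx; exact hlt x (by simp [hx])
        have hb2 : pvLe (pvF N a k k j) (pvRcost N a k (p ++ [k]) j) := by
          refine ihk p.length k p j le_rfl ?_
          intro x hx
          have hx1 : x < k + 1 := hlt x (by simp [hx])
          have hx2 : x ≠ k := fun hc => hknp (hc ▸ hx)
          omega
        rw [pvF_col N a hnn k i] at hb1
        refine pvLe_trans (pvOmin_le_right _ _) ?_
        exact pvOadd_mono hb1 hb2
      · refine pvLe_trans (pvOmin_le_left _ _) (ihk ws.length i ws j le_rfl ?_)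
        intro x hx
        have := hlt x hx
        have : x ≠ k := fun hc => hk (hc ▸ hx)
        omega

-- Floyd-Warshall soundness: every finite entry is bounded below by an actual walk
theorem pvF_sound (N : Nat) (a : Nat → Nat → Int) (hnn : ∀ i j, i < N → j < N → 0 ≤ a i j) :
    ∀ (k i j : Nat), pvF N a k i j = none ∨ ∃ vs, pvLe (pvRcost N a i vs j) (pvF N a k i j) := by
  intro k
  induction k with
  | zero =>
    intro i j
    show pvM0 N a i j = none ∨ ∃ vs, pvLe (pvRcost N a i vs j) (pvM0 N a i j)
    unfold pvM0
    by_cases hin : i < N ∧ j < N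
    · rw [if_pos hin]
      by_cases hz : a i j = 0 ∧ i ≠ j
      · rw [if_pos hz]; exact Or.inl rfl
      · rw [if_neg hz]
        right
        by_cases hij : i = j
        · subst hij
          refine ⟨[], ?_⟩
          show pvLe (if i = i then some (0:Int) else none) (some (a i i))
          rw [if_pos rfl]
          show (0:Int) ≤ a i i
          exact hnn i i hin.1 hin.2
        · have h0 : a i j ≠ 0 := fun hc => hz ⟨hc, hij⟩
          have hpos : 0 < a i j := lt_of_le_of_ne (hnn i j hin.1 hin.2) (Ne.symm h0)
          refine ⟨[i], ?_⟩
          have : pvRcost N a i [i] j = pvW N a i j := by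
            show pvOadd (if i = i then some (0:Int) else none) (pvW N a i j) = _
            rw [if_pos rfl, pvOadd_zero_left]
          rw [this]
          unfold pvW
          rw [if_pos ⟨hin.1, hin.2, hij, hpos⟩]
          exact pvLe_refl _
    · rw [if_neg hin]; exact Or.inl rfl
  | succ k ih =>
    intro i j
    have hrw : pvF N a (k + 1) i j = pvOmin (pvF N a k i j) (pvOadd (pvF N a k i k) (pvF N a k k j)) := rfl
    rcases pvOmin_cases (pvF N a k i j) (pvOadd (pvF N a k i k) (pvF N a k k j)) with hc | hc
    · rcases ih i j with h | ⟨vs, hvs⟩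
      · left; rw [hrw, hc, h]
      · right; exact ⟨vs, by rw [hrw, hc]; exact hvs⟩
    · by_cases hnone : pvOadd (pvF N a k i k) (pvF N a k k j) = none
      · left; rw [hrw, hc, hnone]
      · rcases ih i k with h1 | ⟨vs1, hvs1⟩
        · exact absurd (by rw [h1, pvOadd_none_left]) hnone
        · rcases ih k j with h2 | ⟨vs2, hvs2⟩
          · exact absurd (by rw [h2, pvOadd_none_right]) hnone
          · right
            have hFik : pvF N a k i k ≠ none := fun hcc => hnone (by rw [hcc, pvOadd_none_left])
            have hFkj : pvF N a k k j ≠ none := fun hcc => hnone (by rw [hcc, pvOadd_none_right])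
            have hr2 : pvRcost N a k vs2 j ≠ none := by
              intro hcc
              rw [hcc] at hvs2
              exact hFkj (pvLe_none_left hvs2)
            rcases pvRcost_last N a k vs2 j hr2 with hv2 | hv2
            · subst hv2
              have hkj : k = j := by
                by_contra hne
                exact hr2 (by show (if k = j then some (0:Int) else none) = none; rw [if_neg hne])
              subst hkj
              refine ⟨vs1, ?_⟩
              rw [hrw, hc]
              exact pvLe_trans hvs1 (pvLe_oadd_right (pvF_nonneg N a hnn k k k))
            · have hne : vs2 ≠ [] := by intro hcc; rw [hcc] at hv2; cases hv2
              have hlast : vs2.getLast hne = k := by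
                have := List.getLast?_eq_getLast (l := vs2) hne
                rw [hv2] at this
                exact (Option.some_inj).mp this.symm
              have hdec : vs2.dropLast ++ [k] = vs2 := by
                rw [← hlast]
                exact List.dropLast_append_getLast hne
              refine ⟨vs2.dropLast ++ k :: vs1, ?_⟩
              rw [pvRcost_split N a i k vs2.dropLast vs1 j, hdec, hrw, hc]
              exact pvOadd_mono hvs1 hvs2

-- the two algorithms compute the same off-diagonal values
theorem pvF_eq_pvBW (N : Nat) (a : Nat → Nat → Int) (hnn : ∀ i j, i < N → j < N → 0 ≤ a i j)
    (i j : Nat) (hij : i ≠ j) : pvF N a N i j = pvBW N a N i j := by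
  refine pvLe_antisymm ?_ ?_
  · rcases pvBW_sound N a N i j with h | ⟨vs, hvs⟩
    · rw [h]; exact pvLe_none _
    · by_cases hr : pvRcost N a i vs j = none
      · rw [hr] at hvs
        rw [pvLe_none_left hvs]
        exact pvLe_none _
      · have hb : ∀ x ∈ vs, x < N := by
          intro x hx
          by_contra hc
          exact hr (pvRcost_top N a i vs j ⟨x, hx, hc⟩)
        rcases pvRcost_last N a i vs j hr with hv | hv
        · subst hv
          exact absurd (by show (if i = j then some (0:Int) else none) = none; rw [if_neg hij]) hr
        · have hne : vs ≠ [] := by intro hcc; rw [hcc] at hv; cases hv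
          have hlast : vs.getLast hne = i := by
            have := List.getLast?_eq_getLast (l := vs) hne
            rw [hv] at this
            exact (Option.some_inj).mp this.symm
          have hdec : vs.dropLast ++ [i] = vs := by
            rw [← hlast]
            exact List.dropLast_append_getLast hne
          have hcomp := pvF_complete N a hnn N vs.dropLast.length i vs.dropLast j le_rfl
            (fun x hx => hb x (List.Sublist.mem hx (List.dropLast_sublist _)))
          rw [hdec] at hcomp
          exact pvLe_trans hcomp hvs
  · rcases pvF_sound N a hnn N i j with h | ⟨vs, hvs⟩
    · rw [h]; exact pvLe_none _
    · exact pvLe_trans (pvBW_stab N a i vs.length vs j le_rfl) hvs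


-- canonical-matrix bridge lemmas
theorem pvCanon_congr (N : Nat) {f g : Nat → Nat → Option Int}
    (h : ∀ p q, p < N → q < N → f p q = g p q) : pvCanon N f = pvCanon N g := by
  unfold pvCanon
  refine List.map_congr_left ?_
  intro p hp
  refine List.map_congr_left ?_
  intro q hq
  exact h p q (List.mem_range.mp hp) (List.mem_range.mp hq)

theorem pvRow_canon (N : Nat) (f : Nat → Nat → Option Int) {i : Nat} (hi : i < N) :
    (pvCanon N f).getD i [] = (List.range N).map (f i) := by
  unfold pvCanon
  rw [List.getD_eq_getElem?_getD, List.getElem?_map, List.getElem?_range hi]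
  rfl

theorem pvMget_canon (N : Nat) (f : Nat → Nat → Option Int) {i j : Nat} (hi : i < N) (hj : j < N) :
    pvMget (pvCanon N f) i j = f i j := by
  unfold pvMget
  rw [pvRow_canon N f hi, List.getD_eq_getElem?_getD, List.getElem?_map, List.getElem?_range hj]
  rfl

theorem pvDget_vec (N : Nat) (h : Nat → Option Int) {v : Nat} (hv : v < N) :
    pvDget (pvVec N h) v = h v := by
  unfold pvDget pvVec
  rw [List.getD_eq_getElem?_getD, List.getElem?_map, List.getElem?_range hv]
  rfl

theorem pvSet_map_range {α : Type} (g : Nat → α) (N j : Nat) (v : α) (hj : j < N) :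
    ((List.range N).map g).set j v = (List.range N).map (fun q => if q = j then v else g q) := by
  refine List.ext_getElem (by simp) ?_
  intro p h1 h2
  simp only [List.getElem_set, List.getElem_map, List.getElem_range]
  by_cases hpj : p = j
  · subst hpj; simp
  · rw [if_neg (fun hc => hpj hc.symm), if_neg hpj]

theorem pvMset_canon (N : Nat) (f : Nat → Nat → Option Int) {i j : Nat} (v : Option Int)
    (hi : i < N) (hj : j < N) :
    pvMset (pvCanon N f) i j v = pvCanon N (fun p q => if p = i ∧ q = j then v else f p q) := by
  unfold pvMset
  rw [pvRow_canon N f hi, pvSet_map_range (f i) N j v hj]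
  show (pvCanon N f).set i _ = _
  unfold pvCanon
  rw [pvSet_map_range (fun i => (List.range N).map (f i)) N i _ hi]
  refine List.map_congr_left ?_
  intro p hp
  by_cases hpi : p = i
  · subst hpi
    rw [if_pos rfl]
    refine List.map_congr_left ?_
    intro q _
    by_cases hqj : q = j
    · subst hqj; simp
    · simp [hqj]
  · rw [if_neg hpi]
    refine (List.map_congr_left ?_).symm
    intro q _
    simp [hpi]


-- the mixed state of A's in-place round k: cells before (i0, j0) already updated
def pvG (N : Nat) (a : Nat → Nat → Int) (k i0 j0 : Nat) : Nat → Nat → Option Int :=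
  fun p q => if p < i0 ∨ (p = i0 ∧ q < j0) then pvF N a (k + 1) p q else pvF N a k p q

theorem pvG_mget_ij (N : Nat) (a : Nat → Nat → Int) (k i0 j0 : Nat) :
    pvG N a k i0 j0 i0 j0 = pvF N a k i0 j0 := by
  unfold pvG
  rw [if_neg]
  omega

theorem pvG_mget_ik (N : Nat) (a : Nat → Nat → Int) (hnn : ∀ i j, i < N → j < N → 0 ≤ a i j)
    (k i0 j0 : Nat) : pvG N a k i0 j0 i0 k = pvF N a k i0 k := by
  unfold pvG
  split
  · exact pvF_col N a hnn k i0
  · rfl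

theorem pvG_mget_kj (N : Nat) (a : Nat → Nat → Int) (hnn : ∀ i j, i < N → j < N → 0 ≤ a i j)
    (k i0 j0 : Nat) : pvG N a k i0 j0 k j0 = pvF N a k k j0 := by
  unfold pvG
  split
  · rename_i h
    rcases h with h | h
    · exact pvF_row N a hnn k j0
    · omega
  · rfl

-- one in-place inner (j) loop turns row i0 of layer mix (i0,0) into mix (i0, j0)
theorem pvA_inner (N : Nat) (a : Nat → Nat → Int) (hnn : ∀ i j, i < N → j < N → 0 ≤ a i j)
    (k i0 : Nat) (hkN : k < N) (hi0 : i0 < N) :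
    ∀ j0, j0 ≤ N →
      (List.range j0).foldl (fun M j =>
          pvMset M i0 j (pvOmin (pvMget M i0 j) (pvOadd (pvMget M i0 k) (pvMget M k j))))
        (pvCanon N (pvG N a k i0 0)) = pvCanon N (pvG N a k i0 j0) := by
  intro j0
  induction j0 with
  | zero => intro _; rfl
  | succ j0 ih =>
    intro h
    rw [List.range_succ, List.foldl_append, ih (by omega), List.foldl_cons, List.foldl_nil]
    have hj0 : j0 < N := by omega
    rw [pvMget_canon N _ hi0 hj0]
    rw [pvMget_canon N _ hi0 hkN, pvMget_canon N _ hkN hj0,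
      pvG_mget_ij, pvG_mget_ik N a hnn, pvG_mget_kj N a hnn,
      pvMset_canon N _ _ hi0 hj0]
    refine pvCanon_congr N ?_
    intro p q hp hq
    unfold pvG
    by_cases hpq : p = i0 ∧ q = j0
    · rw [if_pos hpq, if_pos (by omega)]
      rw [hpq.1, hpq.2]
      rfl
    · rw [if_neg hpq]
      by_cases hc : p < i0 ∨ (p = i0 ∧ q < j0)
      · rw [if_pos hc, if_pos (by omega)]
      · rw [if_neg hc, if_neg (by omega)]


-- whole in-place outer loop of round k
theorem pvA_outer (N : Nat) (a : Nat → Nat → Int) (hnn : ∀ i j, i < N → j < N → 0 ≤ a i j)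
    (k : Nat) (hkN : k < N) :
    ∀ i0, i0 ≤ N →
      (List.range i0).foldl (fun M i =>
          (List.range N).foldl (fun M j =>
            pvMset M i j (pvOmin (pvMget M i j) (pvOadd (pvMget M i k) (pvMget M k j)))) M)
        (pvCanon N (pvF N a k)) = pvCanon N (pvG N a k i0 0) := by
  intro i0
  induction i0 with
  | zero =>
    intro _
    refine pvCanon_congr N ?_
    intro p q _ _
    unfold pvG
    rw [if_neg (by omega)]
  | succ i0 ih =>
    intro h
    have hi0 : i0 < N := by omega
    rw [List.range_succ, List.foldl_append, ih (by omega), List.foldl_cons, List.foldl_nil]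
    rw [pvA_inner N a hnn k i0 hkN hi0 N le_rfl]
    refine pvCanon_congr N ?_
    intro p q hp hq
    unfold pvG
    by_cases hc : p < i0 ∨ (p = i0 ∧ q < N)
    · rw [if_pos hc, if_pos (by omega)]
    · rw [if_neg hc, if_neg (by omega)]

-- the whole Floyd-Warshall triple loop
theorem pvA_fw (N : Nat) (a : Nat → Nat → Int) (hnn : ∀ i j, i < N → j < N → 0 ≤ a i j) :
    ∀ K, K ≤ N →
      (List.range K).foldl (fun M k =>
          (List.range N).foldl (fun M i =>
            (List.range N).foldl (fun M j =>
              pvMset M i j (pvOmin (pvMget M i j) (pvOadd (pvMget M i k) (pvMget M k j)))) M) M)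
        (pvCanon N (pvM0 N a)) = pvCanon N (pvF N a K) := by
  intro K
  induction K with
  | zero => intro _; rfl
  | succ K ih =>
    intro h
    rw [List.range_succ, List.foldl_append, ih (by omega), List.foldl_cons, List.foldl_nil]
    rw [pvA_outer N a hnn K (by omega) N le_rfl]
    refine pvCanon_congr N ?_
    intro p q hp hq
    unfold pvG
    rw [if_pos (by omega)]

-- the two summing double loops, as functions of the final distance function
def pvSumA (N : Nat) (g : Nat → Nat → Option Int) : Int × Int :=
  (List.range N).foldl (fun p i =>
    (List.range N).foldl (fun p j =>
      if i ≠ j then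
        match g i j with
        | none => (p.1, p.2 + 1)
        | some v => (p.1 + v, p.2)
      else p) p) ((0 : Int), (0 : Int))

def pvSumB (N : Nat) (g : Nat → Nat → Option Int) : Int × Int :=
  (List.range N).foldl (fun p s =>
    (List.range N).foldl (fun p v =>
      if v = s then p
      else
        match g s v with
        | none => (p.1, p.2 + 1)
        | some x => (p.1 + x, p.2)) p) ((0 : Int), (0 : Int))

theorem pvSumA_eq_pvSumB (N : Nat) (g h : Nat → Nat → Option Int)
    (hgh : ∀ i j, i < N → j < N → i ≠ j → g i j = h i j) : pvSumA N g = pvSumB N h := by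
  unfold pvSumA pvSumB
  refine PySem.List.foldl_congr_mem _ _ _ _ ?_
  intro p i hi
  refine PySem.List.foldl_congr_mem _ _ _ _ ?_
  intro q j hj
  by_cases hij : i = j
  · subst hij
    rw [if_neg (by simp), if_pos rfl]
  · rw [if_pos (by omega), if_neg (fun hc => hij hc.symm),
      hgh i j (List.mem_range.mp hi) (List.mem_range.mp hj) hij]

-- the Python min over the filtered candidate list is pvVmin over all u < N
theorem pvFoldMin_filter (P : Nat → Prop) [DecidablePred P] (f g : Nat → Option Int) :
    ∀ (l : List Nat) (init : Option Int),
      (∀ u ∈ l, (P u → f u = g u) ∧ (¬ P u → g u = none)) →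
      ((l.filter (fun u => decide (P u))).map f).foldl pvOmin init
        = l.foldl (fun acc u => pvOmin acc (g u)) init := by
  intro l
  induction l with
  | nil => intro init _; rfl
  | cons u us ih =>
    intro init h
    by_cases hP : P u
    · rw [List.filter_cons_of_pos (by simpa using hP), List.map_cons, List.foldl_cons,
        List.foldl_cons, (h u List.mem_cons_self).1 hP]
      exact ih _ (fun v hv => h v (List.mem_cons_of_mem _ hv))
    · rw [List.filter_cons_of_neg (by simpa using hP), List.foldl_cons,
        (h u List.mem_cons_self).2 hP, pvOmin_none_right]
      exact ih _ (fun v hv => h v (List.mem_cons_of_mem _ hv))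


-- one Jacobi relaxation round of B equals one Bellman-Ford layer
theorem pvB_round (N : Nat) (adj : List (List Int)) (s L : Nat) (hs : s < N) :
    (List.range N).map (fun v =>
      ((((List.range N).filter (fun u => decide (u ≠ v ∧ 0 < pvEntry adj u v))).map
          (fun u => pvOadd (pvDget (pvVec N (pvBW N (pvEntry adj) L s)) u) (some (pvEntry adj u v)))).foldl
        pvOmin (pvDget (pvVec N (pvBW N (pvEntry adj) L s)) v)))
      = pvVec N (pvBW N (pvEntry adj) (L + 1) s) := by
  show _ = (List.range N).map (pvBW N (pvEntry adj) (L + 1) s)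
  refine List.map_congr_left ?_
  intro v hv
  have hvN : v < N := List.mem_range.mp hv
  rw [pvDget_vec N _ hvN]
  rw [pvFoldMin_filter (fun u => u ≠ v ∧ 0 < pvEntry adj u v)
      (fun u => pvOadd (pvDget (pvVec N (pvBW N (pvEntry adj) L s)) u) (some (pvEntry adj u v)))
      (fun u => pvOadd (pvBW N (pvEntry adj) L s u) (pvW N (pvEntry adj) u v))
      (List.range N) (pvBW N (pvEntry adj) L s v) ?_]
  · rfl
  · intro u hu
    have huN : u < N := List.mem_range.mp hu
    constructor
    · intro hP
      show pvOadd (pvDget (pvVec N (pvBW N (pvEntry adj) L s)) u) (some (pvEntry adj u v))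
        = pvOadd (pvBW N (pvEntry adj) L s u) (pvW N (pvEntry adj) u v)
      rw [pvDget_vec N _ huN]
      unfold pvW
      rw [if_pos ⟨huN, hvN, hP.1, hP.2⟩]
    · intro hP
      show pvOadd (pvBW N (pvEntry adj) L s u) (pvW N (pvEntry adj) u v) = none
      have : pvW N (pvEntry adj) u v = none := by
        unfold pvW
        rw [if_neg (fun hc => hP ⟨hc.2.2.1, hc.2.2.2⟩)]
      rw [this, pvOadd_none_right]

-- B's n relaxation rounds
theorem pvB_rounds (N : Nat) (adj : List (List Int)) (s : Nat) (hs : s < N) :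
    ∀ (l : List Nat) (L : Nat),
      l.foldl (fun d _ =>
          (List.range N).map (fun v =>
            ((((List.range N).filter (fun u => decide (u ≠ v ∧ 0 < pvEntry adj u v))).map
                (fun u => pvOadd (pvDget d u) (some (pvEntry adj u v)))).foldl
              pvOmin (pvDget d v))))
        (pvVec N (pvBW N (pvEntry adj) L s))
      = pvVec N (pvBW N (pvEntry adj) (L + l.length) s) := by
  intro l
  induction l with
  | nil => intro L; rfl
  | cons x xs ih =>
    intro L
    simp only [List.foldl_cons]
    rw [pvB_round N adj s L hs, ih (L + 1)]
    have : L + 1 + xs.length = L + (xs.length + 1) := by omega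
    rw [this]
    rfl

-- port A computes pvSumA of the Floyd-Warshall result
theorem pvPortA (n : Int) (adj : List (List Int))
    (hnn : ∀ i j, i < n.toNat → j < n.toNat → 0 ≤ pvEntry adj i j) :
    get_sum_of_all_pairs_shortest_paths n adj
      = pvSumA n.toNat (pvF n.toNat (pvEntry adj) n.toNat) := by
  unfold get_sum_of_all_pairs_shortest_paths
  have hinit : (List.range n.toNat).map (fun i => (List.range n.toNat).map (fun j =>
      if pvEntry adj i j = 0 ∧ i ≠ j then none else some (pvEntry adj i j)))
      = pvCanon n.toNat (pvM0 n.toNat (pvEntry adj)) := by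
    unfold pvCanon
    refine List.map_congr_left ?_
    intro i hi
    refine List.map_congr_left ?_
    intro j hj
    unfold pvM0
    rw [if_pos (c := i < n.toNat ∧ j < n.toNat) ⟨List.mem_range.mp hi, List.mem_range.mp hj⟩]
  simp only [hinit, pvA_fw n.toNat (pvEntry adj) hnn n.toNat le_rfl]
  unfold pvSumA
  refine PySem.List.foldl_congr_mem _ _ _ _ ?_
  intro p i hi
  refine PySem.List.foldl_congr_mem _ _ _ _ ?_
  intro q j hj
  by_cases hij : i = j
  · rw [if_neg (by omega), if_neg (by omega)]
  · rw [if_pos hij, if_pos hij,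
      pvMget_canon n.toNat _ (List.mem_range.mp hi) (List.mem_range.mp hj)]

-- port B computes pvSumB of the Bellman-Ford result
theorem pvPortB (n : Int) (adj : List (List Int)) :
    get_sum_of_all_pairs_shortest_paths_alt n adj
      = pvSumB n.toNat (pvBW n.toNat (pvEntry adj) n.toNat) := by
  unfold get_sum_of_all_pairs_shortest_paths_alt
  unfold pvSumB
  refine PySem.List.foldl_congr_mem _ _ _ _ ?_
  intro p s hs
  have hsN : s < n.toNat := List.mem_range.mp hs
  have hd0 : (List.range n.toNat).map (fun v => if v = s then some (0 : Int) else none)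
      = pvVec n.toNat (pvBW n.toNat (pvEntry adj) 0 s) := by
    unfold pvVec
    refine List.map_congr_left ?_
    intro v _
    show _ = (if s = v then some (0:Int) else none)
    by_cases hvs : v = s
    · rw [if_pos hvs, if_pos hvs.symm]
    · rw [if_neg hvs, if_neg (fun hc => hvs hc.symm)]
  have hrounds := pvB_rounds n.toNat adj s hsN (List.range n.toNat) 0
  rw [List.length_range, Nat.zero_add] at hrounds
  simp only [hd0, hrounds]
  refine PySem.List.foldl_congr_mem _ _ _ _ ?_
  intro q v hv
  by_cases hvs : v = s
  · rw [if_pos hvs, if_pos hvs]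
  · rw [if_neg hvs, if_neg hvs,
      pvDget_vec n.toNat _ (List.mem_range.mp hv)]

-- ===== VERDICT (by name: the statement is the Claim_ definition above) =====
theorem get_sum_of_all_pairs_shortest_paths_spec : Claim_equal_get_sum_of_all_pairs_shortest_paths := by
  intro n adj hdom hpre
  unfold Spec_get_sum_of_all_pairs_shortest_paths
  have hnn : ∀ i j, i < n.toNat → j < n.toNat → 0 ≤ pvEntry adj i j :=
    fun i j hi hj => (hpre.2 i hi).2 j hj
  rw [pvPortA n adj hnn, pvPortB n adj]
  exact pvSumA_eq_pvSumB n.toNat _ _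
    (fun i j hi hj hij => pvF_eq_pvBW n.toNat (pvEntry adj) hnn i j hij)
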